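-- pv_equiv track=rewrite | github.com/vinod-metha06/Python | TCS/pal.py | find_Novowels
-- ===== SOURCE A (Python) =====
-- def find_Novowels(l):
--   o=['a','i','e','o','u']
--   res=[]
--   y=True
--   for i in l:
--     c=0
--     for j in i:
--
--       if j.lower() not in o:
--         c+=1
--     if c==len(i):
--       res.append(i)
--   return res
-- ===== SOURCE B (Python) =====
-- def find_Novowels(l):
--     return [s for s in l if not any(v in s.lower() for v in "aeiou")]
-- ===== Notes on version B (the rewrite author's own statement) =====
-- stated objective: idiomatic
-- what changed: inverts the inner loop: instead of counting non-vowel characters and comparing the count to len(s), B lowercases the string once and runs five substring-containment searches (one per vowel), keeping the string when no vowel occurs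
import Mathlib
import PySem

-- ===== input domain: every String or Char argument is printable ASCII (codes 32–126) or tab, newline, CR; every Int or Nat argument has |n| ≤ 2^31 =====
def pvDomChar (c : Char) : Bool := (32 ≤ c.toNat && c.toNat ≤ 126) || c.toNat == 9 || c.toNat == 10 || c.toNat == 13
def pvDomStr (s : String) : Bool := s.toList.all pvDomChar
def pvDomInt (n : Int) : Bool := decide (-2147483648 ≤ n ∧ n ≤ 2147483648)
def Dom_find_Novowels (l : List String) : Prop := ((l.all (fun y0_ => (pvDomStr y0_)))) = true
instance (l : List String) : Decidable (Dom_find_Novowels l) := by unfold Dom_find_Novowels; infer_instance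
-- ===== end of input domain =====

-- B inverts the inner loop: instead of counting non-vowel characters and testing count == len,
-- it lowercases the string once and runs a per-vowel substring-containment search (idiomatic).


-- ===== PORT A =====
def find_Novowels (l : List String) : List String :=
  let o : List Char := ['a', 'i', 'e', 'o', 'u']
  l.foldl (fun res i =>
    let c : Int := i.toList.foldl (fun c j =>
      if ¬ (PySem.Chars.lowerChar j ∈ o) then c + 1 else c) 0
    if c = (i.toList.length : Int) then res ++ [i] else res) []

-- ===== PORT B =====
def find_Novowels_alt (l : List String) : List String :=
  l.filter (fun s =>
    ! ("aeiou".toList.any (fun v => PySem.Chars.isIn [v] (PySem.Chars.lower s.toList))))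

-- ===== PRECONDITION & SPEC =====
def Spec_find_Novowels (l : List String) (out : List String) : Prop := out = find_Novowels_alt l
instance (l : List String) (out : List String) : Decidable (Spec_find_Novowels l out) := by unfold Spec_find_Novowels; infer_instance

-- ===== CLAIM (what is proved, stated in full; the proofs are below) =====
def Claim_equal_find_Novowels : Prop := ∀ (l : List String), Dom_find_Novowels l → Spec_find_Novowels l (find_Novowels l)

-- ===== LEMMAS AND PROOFS =====

-- A's inner loop counts the characters satisfying the test.
theorem pv_count_foldl (p : Char → Prop) [DecidablePred p] (cs : List Char) (a : Int) :
    cs.foldl (fun c j => if p j then c + 1 else c) a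
      = a + ((cs.countP (fun j => decide (p j))) : Int) := by
  induction cs generalizing a with
  | nil => simp
  | cons x xs ih =>
    simp only [List.foldl_cons, List.countP_cons, ih]
    by_cases h : p x
    · simp [h]; ring
    · simp [h]

-- Per string: A's "count of non-vowels = length" test agrees with B's "no vowel occurs in
-- the lowered string" test.
theorem pv_string_cond (s : String) :
    ((s.toList.foldl (fun c j =>
          if ¬ (PySem.Chars.lowerChar j ∈ (['a','i','e','o','u'] : List Char)) then c + 1 else c)
          (0 : Int)) = (s.toList.length : Int))
      ↔ (! ("aeiou".toList.any (fun v => PySem.Chars.isIn [v] (PySem.Chars.lower s.toList)))) = true := by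
  rw [pv_count_foldl]
  simp only [zero_add, Int.natCast_inj, List.countP_eq_length, decide_eq_true_eq,
    Bool.not_eq_eq_eq_not, Bool.not_true, List.any_eq_false, Bool.not_eq_true,
    PySem.Chars.isIn_eq_false_iff, List.singleton_infix_iff,
    PySem.Chars.lower, List.mem_map, show "aeiou".toList = ['a','e','i','o','u'] from rfl]
  constructor
  · rintro h v hv ⟨j, hj, rfl⟩
    have hj' := h j hj
    simp only [List.mem_cons, List.not_mem_nil, or_false] at hj' hv
    tauto
  · intro h j hj hmem
    have hv : PySem.Chars.lowerChar j ∈ (['a','e','i','o','u'] : List Char) := by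
      simp only [List.mem_cons, List.not_mem_nil, or_false] at hmem ⊢
      tauto
    exact h _ hv ⟨j, hj, rfl⟩

-- ===== VERDICT (by name: the statement is the Claim_ definition above) =====
theorem find_Novowels_spec : Claim_equal_find_Novowels := by
  intro l _
  unfold Spec_find_Novowels find_Novowels find_Novowels_alt
  simp only []
  rw [PySem.List.foldl_append_ite_eq_filter]
  simp only [List.nil_append]
  congr 1
  funext s
  simp only [pv_string_cond]
  simp
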